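-- pv_equiv track=rewrite | github.com/actions-marketplace-validations/Lance52259_hcbp-scripts-lint | rules/st_rules/rule_003.py | _remove_comments_for_parsing
-- ===== SOURCE A (Python) =====
-- def _remove_comments_for_parsing(content: str) -> str:
--     """
--     Remove comments from content for parsing, but preserve line structure.
--
--     Args:
--         content (str): The original file content
--
--     Returns:
--         str: Content with comments removed
--     """
--     lines = content.split('\n')
--     cleaned_lines = []
--
--     for line in lines:
--         if '#' in line:
--             in_quotes = False
--             quote_char = None
--             for i, char in enumerate(line):
--                 if char in ['"', "'"] and (i == 0 or line[i-1] != '\\'):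
--                     if not in_quotes:
--                         in_quotes = True
--                         quote_char = char
--                     elif char == quote_char:
--                         in_quotes = False
--                         quote_char = None
--                 elif char == '#' and not in_quotes:
--                     # If the line is only a comment (after stripping), keep the original line
--                     # to preserve line structure
--                     stripped_before_comment = line[:i].strip()
--                     if not stripped_before_comment:
--                         line = line  # Keep original line (comment line)
--                     else:
--                         line = line[:i].rstrip()  # Remove comment but keep content
--                     break
--         cleaned_lines.append(line)
--
--     return '\n'.join(cleaned_lines)
-- ===== SOURCE B (Python) =====
-- def _remove_comments_for_parsing(content: str) -> str:
--     """Single character pass (a small state machine) over the whole content: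
--     tracks quote state, a pending-whitespace run, a content-seen flag and a
--     comment mode (copying for comment-only lines, skipping otherwise)."""
--     out = []
--     pending = []        # run of whitespace since the last committed character
--     seen = False        # non-whitespace seen since line start
--     in_quotes = False
--     quote_char = None
--     prev = None
--     in_comment = False
--     keep_comment = False
--     for c in content:
--         if c == '\n':
--             out += pending
--             out.append('\n')
--             pending = []
--             seen = False
--             in_quotes = False
--             quote_char = None
--             prev = None
--             in_comment = False
--             keep_comment = False
--             continue
--         if in_comment:
--             if keep_comment:
--                 out.append(c)
--             continue
--         if c in ('"', "'") and (prev is None or prev != '\\'):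
--             if not in_quotes:
--                 in_quotes = True
--                 quote_char = c
--             elif c == quote_char:
--                 in_quotes = False
--                 quote_char = None
--         elif c == '#' and not in_quotes:
--             in_comment = True
--             keep_comment = not seen
--             if keep_comment:
--                 # comment-only line: keep it verbatim
--                 out += pending
--                 out.append('#')
--             # else: drop pending whitespace (rstrip) and skip the comment
--             pending = []
--             prev = c
--             continue
--         if c.isspace():
--             pending.append(c)
--         else:
--             out += pending
--             pending = []
--             out.append(c)
--             seen = True
--         prev = c
--     out += pending
--     return ''.join(out)
-- ===== Notes on version B (the rewrite author's own statement) =====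
-- stated objective: alternative
-- what changed: Replaces split(' ') plus a per-line enumerate/slice/strip re-scan with a single character-level pass over the whole content that tracks quote state, a pending-whitespace run and a content-seen flag, resetting at each newline.
import Mathlib
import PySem

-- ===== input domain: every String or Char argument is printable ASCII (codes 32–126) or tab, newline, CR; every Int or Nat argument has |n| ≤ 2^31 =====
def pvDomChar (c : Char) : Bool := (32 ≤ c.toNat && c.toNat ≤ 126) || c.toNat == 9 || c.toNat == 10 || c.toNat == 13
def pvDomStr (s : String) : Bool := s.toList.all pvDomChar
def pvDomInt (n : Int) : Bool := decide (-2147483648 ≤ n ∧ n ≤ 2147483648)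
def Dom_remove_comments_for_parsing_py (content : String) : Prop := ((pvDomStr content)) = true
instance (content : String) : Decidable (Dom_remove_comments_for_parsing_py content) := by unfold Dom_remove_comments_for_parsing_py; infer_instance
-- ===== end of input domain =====

-- B replaces A's split('\n') + per-line enumerate/slice/strip re-scan by a single character-level
-- state machine over the whole content (quote state, pending whitespace, content-seen flag,
-- comment mode); same return value, proved equal on the whole domain.

-- ===== PORT A =====
-- inner "for i, char in enumerate(line)" loop of A, with its break producing the new line value
def pvScanA (line : List Char) : List (Int × Char) → Bool → Option Char → List Char
  | [], _, _ => line
  | (i, c) :: rest, in_quotes, quote_char =>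
    if (c = '"' ∨ c = '\'') ∧ (i = 0 ∨ PySem.List.pyGet? line (i - 1) ≠ some '\\') then
      if in_quotes = false then pvScanA line rest true (some c)
      else if some c = quote_char then pvScanA line rest false none
      else pvScanA line rest in_quotes quote_char
    else if c = '#' ∧ in_quotes = false then
      if PySem.Chars.strip (PySem.List.slice line none (some i)) = [] then line
      else PySem.Chars.rstrip (PySem.List.slice line none (some i))
    else pvScanA line rest in_quotes quote_char

def pvCleanLineA (line : List Char) : List Char :=
  if PySem.Chars.isIn ['#'] line then pvScanA line (PySem.List.enumerate line 0) false none
  else line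

def remove_comments_for_parsing_py (content : String) : String :=
  let lines := PySem.Chars.splitOn content.toList ['\n']
  let cleaned_lines := lines.foldl (fun acc line => acc ++ [pvCleanLineA line]) []
  String.ofList (PySem.Chars.join ['\n'] cleaned_lines)

-- ===== PORT B =====
-- single pass of Source B: (chars, pending, seen, in_quotes, quote_char, prev, in_comment, keep_comment, out)
def pvLoopB : List Char → List Char → Bool → Bool → Option Char → Option Char → Bool → Bool → List Char → List Char
  | [], pending, _, _, _, _, _, _, out => out ++ pending
  | c :: rest, pending, seen, in_quotes, quote_char, prev, in_comment, keep_comment, out =>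
    if c = '\n' then
      pvLoopB rest [] false false none none false false (out ++ pending ++ ['\n'])
    else if in_comment then
      pvLoopB rest pending seen in_quotes quote_char prev in_comment keep_comment
        (if keep_comment then out ++ [c] else out)
    else if (c = '"' ∨ c = '\'') ∧ (prev = none ∨ prev ≠ some '\\') then
      let st := if in_quotes = false then (true, some c)
                else if some c = quote_char then ((false : Bool), (none : Option Char))
                else (in_quotes, quote_char)
      pvLoopB rest [] true st.1 st.2 (some c) false false (out ++ pending ++ [c])
    else if c = '#' ∧ in_quotes = false then
      if seen = false then
        pvLoopB rest [] seen in_quotes quote_char (some c) true true (out ++ pending ++ ['#'])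
      else
        pvLoopB rest [] seen in_quotes quote_char (some c) true false out
    else if PySem.Chars.isspace c then
      pvLoopB rest (pending ++ [c]) seen in_quotes quote_char (some c) false false out
    else
      pvLoopB rest [] true in_quotes quote_char (some c) false false (out ++ pending ++ [c])

def remove_comments_for_parsing_py_alt (content : String) : String :=
  String.ofList (pvLoopB content.toList [] false false none none false false [])

-- ===== PRECONDITION & SPEC =====
def Spec_remove_comments_for_parsing_py (content : String) (out : String) : Prop := out = remove_comments_for_parsing_py_alt content
instance (content : String) (out : String) : Decidable (Spec_remove_comments_for_parsing_py content out) := by unfold Spec_remove_comments_for_parsing_py; infer_instance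

-- ===== CLAIM (what is proved, stated in full; the proofs are below) =====
def Claim_equal_remove_comments_for_parsing_py : Prop := ∀ (content : String), Dom_remove_comments_for_parsing_py content → Spec_remove_comments_for_parsing_py content (remove_comments_for_parsing_py content)

-- ===== LEMMAS AND PROOFS =====

-- reference split on '\n' (structural; shown equal to PySem.Chars.splitOn · ['\n'])
def nlSplit : List Char → List (List Char)
  | [] => [[]]
  | c :: r => if c = '\n' then [] :: nlSplit r else (nlSplit r).modifyHead (c :: ·)

lemma nlSplit_ne_nil (cs : List Char) : nlSplit cs ≠ [] := by
  induction cs with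
  | nil => simp [nlSplit]
  | cons c r ih =>
    simp only [nlSplit]
    split_ifs
    · simp
    · simpa using fun h => ih (by simpa using congrArg List.length h)

lemma nlSplit_no_nl (l : List Char) (h : ∀ c ∈ l, c ≠ '\n') : nlSplit l = [l] := by
  induction l with
  | nil => rfl
  | cons c r ih =>
    have hc : c ≠ '\n' := h c (by simp)
    simp only [nlSplit, if_neg hc, ih (fun x hx => h x (by simp [hx])), List.modifyHead]

lemma nlSplit_append_nl (l r : List Char) (h : ∀ c ∈ l, c ≠ '\n') :
    nlSplit (l ++ '\n' :: r) = l :: nlSplit r := by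
  induction l with
  | nil => simp [nlSplit]
  | cons c t ih =>
    have hc : c ≠ '\n' := h c (by simp)
    simp only [List.cons_append, nlSplit, if_neg hc, ih (fun x hx => h x (by simp [hx])),
      List.modifyHead]

lemma go_nl (l : List Char) : ∀ (fuel : Nat) (cur : List Char) (acc : List (List Char)),
    l.length < fuel →
    PySem.Chars.splitOn.go ['\n'] fuel l cur acc
      = acc.reverse ++ (nlSplit l).modifyHead (cur.reverse ++ ·) := by
  induction l with
  | nil =>
    intro fuel cur acc hf
    match fuel with
    | f + 1 => simp [PySem.Chars.splitOn.go, nlSplit]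
  | cons c r ih =>
    intro fuel cur acc hf
    match fuel with
    | f + 1 =>
      by_cases hc : c = '\n'
      · subst hc
        rw [PySem.Chars.splitOn.go]
        simp only [List.isPrefixOf, BEq.rfl, Bool.and_true, if_pos, List.length_nil,
          Nat.zero_add, List.drop_succ_cons, List.drop_zero, List.length_cons] at *
        rw [ih f [] ((cur.reverse) :: acc) (by omega)]
        simp [nlSplit]
        exact congrFun List.modifyHead_id _
      · rw [PySem.Chars.splitOn.go]
        have hpre : (List.isPrefixOf ['\n'] (c :: r)) = false := by
          simp [List.isPrefixOf]
          exact fun h => absurd h.symm hc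
        rw [if_neg (by simp [hpre])]
        rw [ih f (c :: cur) acc (by simp at hf; omega)]
        simp [nlSplit, hc]
        cases h : nlSplit r with
        | nil => exact absurd h (nlSplit_ne_nil r)
        | cons a t => simp [List.modifyHead]

lemma splitOn_eq_nlSplit (cs : List Char) : PySem.Chars.splitOn cs ['\n'] = nlSplit cs := by
  show PySem.Chars.splitOn.go _ _ _ _ _ = _
  rw [go_nl cs (cs.length + 1) [] [] (by omega)]
  simp
  exact congrFun List.modifyHead_id _

lemma strip_eq_nil_iff (p : List Char) :
    PySem.Chars.strip p = [] ↔ p.all PySem.Chars.isspace = true := by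
  unfold PySem.Chars.strip PySem.Chars.rstrip PySem.Chars.lstrip
  rw [List.reverse_eq_nil_iff, List.dropWhile_eq_nil_iff]
  constructor
  · intro h
    rw [List.all_eq_true]
    intro c hc
    have hsplit : c ∈ List.takeWhile PySem.Chars.isspace p ++ List.dropWhile PySem.Chars.isspace p := by
      rw [List.takeWhile_append_dropWhile]; exact hc
    rcases List.mem_append.1 hsplit with h1 | h2
    · exact List.mem_takeWhile_imp h1
    · exact h c (by simpa using h2)
  · intro h c hc
    rw [List.all_eq_true] at h
    have : c ∈ p := List.dropWhile_sublist (p := PySem.Chars.isspace) |>.mem (by simpa using hc)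
    exact h c this

lemma rstrip_append_ws (q pending : List Char)
    (hp : pending.all PySem.Chars.isspace = true)
    (hq : ∀ c, q.getLast? = some c → PySem.Chars.isspace c = false) :
    PySem.Chars.rstrip (q ++ pending) = q := by
  unfold PySem.Chars.rstrip
  rw [List.reverse_append, List.dropWhile_append]
  have h1 : List.dropWhile PySem.Chars.isspace pending.reverse = [] := by
    rw [List.dropWhile_eq_nil_iff]
    intro c hc
    exact (List.all_eq_true.1 hp) c (by simpa using hc)
  simp only [h1, List.isEmpty_nil, if_pos]
  cases hqr : q.reverse with
  | nil => simpa using congrArg List.reverse hqr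
  | cons a t =>
    have ha : q.getLast? = some a := by
      rw [← List.head?_reverse, hqr]; rfl
    rw [List.dropWhile_cons, hq a ha]
    simp [← hqr]

-- common middle spec: the code before the first unquoted '#' of a line (p = prefix already scanned)
def findCut : List Char → List Char → Bool → Option Char → Option (List Char)
  | [], _, _, _ => none
  | c :: r, p, inQ, qc =>
    if (c = '"' ∨ c = '\'') ∧ (p = [] ∨ p.getLast? ≠ some '\\') then
      if inQ = false then findCut r (p ++ [c]) true (some c)
      else if some c = qc then findCut r (p ++ [c]) false none
      else findCut r (p ++ [c]) inQ qc
    else if c = '#' ∧ inQ = false then some p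
    else findCut r (p ++ [c]) inQ qc

lemma findCut_none (r : List Char) : ∀ (p : List Char) (inQ : Bool) (qc : Option Char),
    '#' ∉ r → findCut r p inQ qc = none := by
  induction r with
  | nil => intros; rfl
  | cons c t ih =>
    intro p inQ qc h
    have hc : c ≠ '#' := fun e => h (by simp [e])
    have ht : '#' ∉ t := fun e => h (by simp [e])
    unfold findCut
    split_ifs with h1 h2 h3 h4
    · exact ih _ _ _ ht
    · exact ih _ _ _ ht
    · exact ih _ _ _ ht
    · exact absurd h4.1 hc
    · exact ih _ _ _ ht

lemma isIn_hash (l : List Char) : PySem.Chars.isIn ['#'] l = true ↔ '#' ∈ l := by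
  rw [PySem.Chars.isIn_iff_infix]
  constructor
  · intro h; exact h.subset (by simp)
  · intro h
    obtain ⟨s, t, rfl⟩ := List.append_of_mem h
    exact ⟨s, t, by simp⟩

-- the per-line result both programs compute
def lineRes (l : List Char) : List Char :=
  match findCut l [] false none with
  | none => l
  | some cp => if PySem.Chars.strip cp = [] then l else PySem.Chars.rstrip cp

lemma scanA_eq (rem : List Char) : ∀ (p : List Char) (inQ : Bool) (qc : Option Char),
    pvScanA (p ++ rem) (PySem.List.enumerate rem (p.length : Int)) inQ qc
      = match findCut rem p inQ qc with
        | none => p ++ rem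
        | some cp => if PySem.Chars.strip cp = [] then p ++ rem else PySem.Chars.rstrip cp := by
  induction rem with
  | nil => intro p inQ qc; rfl
  | cons c r ih =>
    intro p inQ qc
    rw [PySem.List.enumerate_cons]
    have happ : p ++ c :: r = (p ++ [c]) ++ r := by simp
    have hlen : (p.length : Int) + 1 = (((p ++ [c]).length : Nat) : Int) := by
      simp only [List.length_append, List.length_singleton]; push_cast; ring
    have hcond : ((p.length : Int) = 0 ∨ PySem.List.pyGet? (p ++ c :: r) ((p.length : Int) - 1) ≠ some '\\')
               ↔ (p = [] ∨ p.getLast? ≠ some '\\') := by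
      rcases List.eq_nil_or_concat p with hp | ⟨q, a, hqa⟩
      · subst hp; simp
      · subst hqa
        simp only [List.concat_eq_append]
        have hidx : (((q ++ [a]).length : Nat) : Int) - 1 = ((q.length : Nat) : Int) := by
          simp only [List.length_append, List.length_singleton]; push_cast; ring
        have hget : PySem.List.pyGet? ((q ++ [a]) ++ c :: r) (((q.length : Nat) : Int)) = some a := by
          rw [PySem.List.pyGet?_natCast, List.getElem?_append_left (by simp)]
          simp
        rw [hidx, hget]
        simp only [List.concat_eq_append] at *
        constructor
        · rintro (h | h)
          · exact absurd h (by omega)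
          · simp at h; simp [h]
        · rintro (h | h)
          · exact absurd h (by simp)
          · exact Or.inr (by simpa using h)
    rw [pvScanA.eq_2, findCut.eq_2]
    by_cases h1 : (c = '"' ∨ c = '\'') ∧ (p = [] ∨ p.getLast? ≠ some '\\')
    · rw [if_pos ⟨h1.1, hcond.mpr h1.2⟩, if_pos h1]
      by_cases h2 : inQ = false
      · rw [if_pos h2, if_pos h2, happ, hlen, ih]
      · rw [if_neg h2, if_neg h2]
        by_cases h3 : some c = qc
        · rw [if_pos h3, if_pos h3, happ, hlen, ih]
        · rw [if_neg h3, if_neg h3, happ, hlen, ih]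
    · rw [if_neg (fun hh => h1 ⟨hh.1, hcond.mp hh.2⟩), if_neg h1]
      by_cases h2 : c = '#' ∧ inQ = false
      · rw [if_pos h2, if_pos h2]
        rw [PySem.List.slice_to_natCast, List.take_left]
      · rw [if_neg h2, if_neg h2, happ, hlen, ih]

lemma cleanA_eq (l : List Char) : pvCleanLineA l = lineRes l := by
  unfold pvCleanLineA
  by_cases hin : PySem.Chars.isIn ['#'] l = true
  · rw [if_pos hin]
    have := scanA_eq l [] false none
    simpa [lineRes] using this
  · rw [if_neg hin]
    have hmem : '#' ∉ l := fun hm => hin ((isIn_hash l).2 hm)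
    unfold lineRes
    rw [findCut_none l [] false none hmem]

lemma pvLoopB_comment (tail? : Option (List Char)) (rem : List Char) :
    ∀ (pending : List Char) (seen inQ : Bool) (qc prev : Option Char) (keep : Bool) (out : List Char),
    (∀ c ∈ rem, c ≠ '\n') →
    pvLoopB (rem ++ (match tail? with | none => [] | some rest => '\n' :: rest))
        pending seen inQ qc prev true keep out
    = (let out' := (if keep then out ++ rem else out) ++ pending
       match tail? with
       | none => out'
       | some rest => pvLoopB rest [] false false none none false false (out' ++ ['\n'])) := by
  induction rem with
  | nil =>
    intro pending seen inQ qc prev keep out _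
    cases tail? with
    | none => simp [pvLoopB]
    | some rest => simp [pvLoopB]
  | cons c t ih =>
    intro pending seen inQ qc prev keep out h
    have hc : c ≠ '\n' := h c (by simp)
    rw [List.cons_append, pvLoopB.eq_2, if_neg hc, if_pos rfl]
    rw [ih pending seen inQ qc prev keep _ (fun x hx => h x (by simp [hx]))]
    cases tail? <;> cases keep <;> simp

lemma pvLoopB_line (tail? : Option (List Char)) (rem : List Char) :
    ∀ (q pending : List Char) (inQ : Bool) (qc : Option Char) (out0 : List Char),
    (∀ c ∈ rem, c ≠ '\n') →
    pending.all PySem.Chars.isspace = true →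
    (∀ c, q.getLast? = some c → PySem.Chars.isspace c = false) →
    pvLoopB (rem ++ (match tail? with | none => [] | some rest => '\n' :: rest))
        pending (!q.isEmpty) inQ qc ((q ++ pending).getLast?) false false (out0 ++ q)
    = (let res := match findCut rem (q ++ pending) inQ qc with
                  | none => q ++ pending ++ rem
                  | some cp => if PySem.Chars.strip cp = [] then q ++ pending ++ rem
                               else PySem.Chars.rstrip cp
       match tail? with
       | none => out0 ++ res
       | some rest => pvLoopB rest [] false false none none false false (out0 ++ res ++ ['\n'])) := by
  induction rem with
  | nil =>
    intro q pending inQ qc out0 _ _ _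
    cases tail? with
    | none => simp [pvLoopB, findCut]
    | some rest => simp [pvLoopB, findCut]
  | cons c r ih =>
    intro q pending inQ qc out0 h hws hq
    have hc : c ≠ '\n' := h c (by simp)
    have hr : ∀ x ∈ r, x ≠ '\n' := fun x hx => h x (by simp [hx])
    rw [List.cons_append, pvLoopB.eq_2, if_neg hc]
    rw [if_neg (by simp : ¬((false : Bool) = true))]
    rw [findCut.eq_2]
    have hcond : ((c = '"' ∨ c = '\'') ∧ ((q ++ pending).getLast? = none ∨ (q ++ pending).getLast? ≠ some '\\'))
               ↔ ((c = '"' ∨ c = '\'') ∧ (q ++ pending = [] ∨ (q ++ pending).getLast? ≠ some '\\')) := by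
      rw [List.getLast?_eq_none_iff]
    by_cases h1 : (c = '"' ∨ c = '\'') ∧ (q ++ pending = [] ∨ (q ++ pending).getLast? ≠ some '\\')
    · rw [if_pos (hcond.mpr h1), if_pos h1]
      have hcs : PySem.Chars.isspace c = false := by
        rcases h1.1 with rfl | rfl <;> decide
      have hqlast : ∀ x, (q ++ pending ++ [c]).getLast? = some x → PySem.Chars.isspace x = false := by
        intro x hx
        rw [List.append_assoc, List.getLast?_append, List.getLast?_append] at hx
        simp at hx; subst hx; exact hcs
      have hie : (q ++ (pending ++ [c])).isEmpty = false := by simp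
      cases inQ with
      | false =>
        have h5 := ih (q ++ pending ++ [c]) [] true (some c) out0 hr (by simp) hqlast
        simp only [List.append_nil, List.append_assoc, List.getLast?_append,
          List.getLast?_singleton, hie] at h5 ⊢
        simpa using h5
      | true =>
        by_cases h3 : some c = qc
        · have h5 := ih (q ++ pending ++ [c]) [] false none out0 hr (by simp) hqlast
          simp only [List.append_nil, List.append_assoc, List.getLast?_append,
            List.getLast?_singleton, hie] at h5 ⊢
          simpa [← h3] using h5
        · have h5 := ih (q ++ pending ++ [c]) [] true qc out0 hr (by simp) hqlast
          simp only [List.append_nil, List.append_assoc, List.getLast?_append,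
            List.getLast?_singleton, hie] at h5 ⊢
          simpa [h3] using h5
    · rw [if_neg (fun hh => h1 (hcond.mp hh)), if_neg h1]
      by_cases h2 : c = '#' ∧ inQ = false
      · rw [if_pos h2, if_pos h2]
        by_cases hq0 : q = []
        · subst hq0
          rw [show (!(List.isEmpty ([] : List Char))) = false from rfl, if_pos rfl]
          rw [pvLoopB_comment tail? r [] false inQ qc (some c) true _ hr]
          have hstrip : PySem.Chars.strip pending = [] := by
            rw [strip_eq_nil_iff]; exact hws
          obtain ⟨rfl, -⟩ := h2
          cases tail? <;> simp [hstrip]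
        · have hie2 : (!q.isEmpty) = true := by simp [hq0]
          rw [hie2, if_neg (by simp : ¬((true : Bool) = false))]
          rw [pvLoopB_comment tail? r [] true inQ qc (some c) false _ hr]
          obtain ⟨a, ha⟩ : ∃ a, q.getLast? = some a := ⟨q.getLast hq0, List.getLast?_eq_some_getLast hq0⟩
          have hstrip : PySem.Chars.strip (q ++ pending) ≠ [] := by
            intro hnil
            rw [strip_eq_nil_iff] at hnil
            have : PySem.Chars.isspace a = true :=
              (List.all_eq_true.1 hnil) a (List.mem_append_left _ (List.mem_of_getLast? ha))
            rw [hq a ha] at this; exact absurd this (by simp)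
          cases tail? <;> simp [hstrip, rstrip_append_ws q pending hws hq]
      · rw [if_neg h2, if_neg h2]
        by_cases h3 : PySem.Chars.isspace c = true
        · rw [if_pos h3]
          have h5 := ih q (pending ++ [c]) inQ qc out0 hr
            (by
              rw [List.all_append]; rw [hws]; simpa using h3) hq
          simp only [List.append_assoc, List.getLast?_append, List.getLast?_singleton] at h5 ⊢
          simpa using h5
        · rw [if_neg h3]
          have hqlast : ∀ x, (q ++ pending ++ [c]).getLast? = some x → PySem.Chars.isspace x = false := by
            intro x hx
            rw [List.append_assoc, List.getLast?_append, List.getLast?_append] at hx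
            simp at hx; subst hx; exact Bool.eq_false_iff.mpr h3
          have hie : (q ++ (pending ++ [c])).isEmpty = false := by simp
          have h5 := ih (q ++ pending ++ [c]) [] inQ qc out0 hr (by simp) hqlast
          simp only [List.append_nil, List.append_assoc, List.getLast?_append,
            List.getLast?_singleton, hie] at h5 ⊢
          simpa using h5

lemma nl_decomp (cs : List Char) :
    (∀ c ∈ cs, c ≠ '\n') ∨ ∃ l r, cs = l ++ '\n' :: r ∧ ∀ c ∈ l, c ≠ '\n' := by
  induction cs with
  | nil => left; simp
  | cons c t ih =>
    by_cases hc : c = '\n'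
    · right; exact ⟨[], t, by simp [hc], by simp⟩
    · rcases ih with h | ⟨l, r, hlr, hl⟩
      · left
        intro x hx
        rcases List.mem_cons.1 hx with rfl | hx
        · exact hc
        · exact h x hx
      · right
        refine ⟨c :: l, r, by simp [hlr], ?_⟩
        intro x hx
        rcases List.mem_cons.1 hx with rfl | hx
        · exact hc
        · exact hl x hx

lemma pvLoopB_main (n : Nat) : ∀ (cs : List Char), cs.length ≤ n → ∀ (out0 : List Char),
    pvLoopB cs [] false false none none false false out0
      = out0 ++ PySem.Chars.join ['\n'] ((nlSplit cs).map lineRes) := by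
  induction n with
  | zero =>
    intro cs hl out0
    rw [List.length_eq_zero_iff.1 (Nat.le_zero.1 hl)]
    simp [pvLoopB, nlSplit, lineRes, findCut, PySem.Chars.join, List.intercalate]
  | succ n ihn =>
    intro cs hl out0
    rcases nl_decomp cs with hno | ⟨l, r, rfl, hlnl⟩
    · have h5 := pvLoopB_line none cs [] [] false none out0 hno (by simp) (by simp)
      simp only [List.append_nil, List.nil_append, List.isEmpty_nil, Bool.not_true, List.getLast?_nil] at h5
      rw [h5]
      rw [nlSplit_no_nl cs hno]
      simp [PySem.Chars.join, List.intercalate, lineRes]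
    · have h5 := pvLoopB_line (some r) l [] [] false none out0 hlnl (by simp) (by simp)
      simp only [List.append_nil, List.nil_append, List.isEmpty_nil, Bool.not_true, List.getLast?_nil] at h5
      rw [h5]
      have hrlen : r.length ≤ n := by
        simp [List.length_append] at hl; omega
      rw [ihn r hrlen]
      rw [nlSplit_append_nl l r hlnl]
      cases hnr : nlSplit r with
      | nil => exact absurd hnr (nlSplit_ne_nil r)
      | cons b t =>
        rw [← hnr, List.map_cons]
        rw [show (nlSplit r).map lineRes = lineRes b :: t.map lineRes by rw [hnr, List.map_cons]]
        rw [PySem.Chars.join_cons_cons]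
        rw [show lineRes b :: t.map lineRes = (nlSplit r).map lineRes by rw [hnr, List.map_cons]]
        simp [lineRes]

-- ===== VERDICT (by name: the statement is the Claim_ definition above) =====
theorem remove_comments_for_parsing_py_spec : Claim_equal_remove_comments_for_parsing_py := by
  intro content _dom
  unfold Spec_remove_comments_for_parsing_py
  unfold remove_comments_for_parsing_py remove_comments_for_parsing_py_alt
  refine congrArg String.ofList ?_
  rw [splitOn_eq_nlSplit, PySem.List.foldl_append_singleton_eq_map]
  rw [pvLoopB_main (content.toList.length) content.toList le_rfl []]
  rw [List.nil_append]
  congr 1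
  exact List.map_congr_left (fun l _ => cleanA_eq l)
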